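-- pv_equiv track=rewrite | github.com/LyubomiraVelinova/SoftUni-Fundamentals-Module | Python Fundamentals/04_Functions/Exercise/10_array_manipulator.py | get_count_last_odd
-- ===== SOURCE A (Python) =====
-- def get_count_last_odd(numbers, count):
--     temp_list = []
--     counter = 0
--     for i in range(len(numbers) - 1, -1, -1):
--         num = numbers[i]
--         if counter == count:
--             break
--
--         if num % 2 != 0:
--             temp_list.append(num)
--             counter += 1
--
--     temp_list.reverse()
--     return temp_list
-- ===== SOURCE B (Python) =====
-- def get_count_last_odd(numbers, count):
--     odds = [n for n in numbers if n % 2 != 0]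
--     return odds[max(len(odds) - count, 0):]
-- ===== Notes on version B (the rewrite author's own statement) =====
-- stated objective: idiomatic
-- what changed: Replaces A's backward index loop with early break, counter and final reverse by a single forward filter of the odd numbers followed by a trailing slice odds[max(len(odds)-count,0):].
-- outside the precondition, e.g. on get_count_last_odd([1, 2, 3], -1): A returns [1, 3], B returns []
import Mathlib
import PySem

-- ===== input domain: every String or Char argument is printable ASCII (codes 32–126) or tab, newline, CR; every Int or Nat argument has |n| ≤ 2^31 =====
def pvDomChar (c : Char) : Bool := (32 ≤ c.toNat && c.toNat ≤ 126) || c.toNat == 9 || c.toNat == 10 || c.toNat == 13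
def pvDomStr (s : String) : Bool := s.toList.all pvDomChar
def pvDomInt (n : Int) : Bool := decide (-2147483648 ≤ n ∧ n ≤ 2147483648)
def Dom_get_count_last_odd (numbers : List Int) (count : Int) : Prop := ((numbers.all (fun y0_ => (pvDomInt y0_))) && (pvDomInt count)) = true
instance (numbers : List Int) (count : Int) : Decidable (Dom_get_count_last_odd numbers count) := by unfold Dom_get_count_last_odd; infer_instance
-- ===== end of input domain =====

-- B replaces A's backward index loop (early break, counter, final reverse) by a
-- forward filter of the odd numbers followed by a trailing slice (idiomatic, same cost).

-- ===== PORT A =====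
-- Backward loop over range(len-1, -1, -1) with a break, ported as a foldl whose
-- state is (temp_list, counter, broken); `break` sets the flag, later iterations skip.
def get_count_last_odd (numbers : List Int) (count : Int) : List Int :=
  let st := (PySem.List.pyRange ((numbers.length : Int) - 1) (-1) (-1)).foldl
    (fun (st : List Int × Int × Bool) i =>
      let num := PySem.List.pyGetD numbers i 0   -- index always in range here
      if st.2.2 then st
      else if st.2.1 = count then (st.1, st.2.1, true)
      else if PySem.Int.mod num 2 ≠ 0 then (st.1 ++ [num], st.2.1 + 1, st.2.2)
      else st)
    ([], 0, false)
  st.1.reverse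

-- ===== PORT B =====
def get_count_last_odd_alt (numbers : List Int) (count : Int) : List Int :=
  let odds := numbers.filter (fun n => PySem.Int.mod n 2 ≠ 0)
  PySem.List.slice odds (some (max ((odds.length : Int) - count) 0)) none

-- ===== PRECONDITION & SPEC =====
-- Pre_ restricts to the task's natural domain: count is a number of elements to take.
-- For count < 0 A returns all odds while B returns []; negative counts are excluded.
def Pre_get_count_last_odd (numbers : List Int) (count : Int) : Prop := 0 ≤ count
instance (numbers : List Int) (count : Int) : Decidable (Pre_get_count_last_odd numbers count) := by unfold Pre_get_count_last_odd; infer_instance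

def pvWitness_get_count_last_odd : List Int × Int := ([1, 2, 3, 4, 5], 2)

def Spec_get_count_last_odd (numbers : List Int) (count : Int) (out : List Int) : Prop := out = get_count_last_odd_alt numbers count
instance (numbers : List Int) (count : Int) (out : List Int) : Decidable (Spec_get_count_last_odd numbers count out) := by unfold Spec_get_count_last_odd; infer_instance

-- ===== CLAIM (what is proved, stated in full; the proofs are below) =====
def Claim_equal_get_count_last_odd : Prop := ∀ (numbers : List Int) (count : Int), Dom_get_count_last_odd numbers count → Pre_get_count_last_odd numbers count → Spec_get_count_last_odd numbers count (get_count_last_odd numbers count)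

-- ===== LEMMAS AND PROOFS =====

-- the loop body of A, on a list element instead of an index
def pvStep (count : Int) (st : List Int × Int × Bool) (num : Int) : List Int × Int × Bool :=
  if st.2.2 then st
  else if st.2.1 = count then (st.1, st.2.1, true)
  else if PySem.Int.mod num 2 ≠ 0 then (st.1 ++ [num], st.2.1 + 1, st.2.2)
  else st

-- once broken, the state never changes
theorem pvStep_done (count : Int) (ys : List Int) (temp : List Int) (c : Int) :
    ys.foldl (pvStep count) (temp, c, true) = (temp, c, true) := by
  induction ys with
  | nil => rfl
  | cons y ys ih => simpa [pvStep] using ih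

-- loop invariant: starting unbroken with counter c ≤ count, the loop appends
-- the first (count - c) odd elements of the remaining list
theorem pvStep_invariant (count : Int) (ys : List Int) :
    ∀ (temp : List Int) (c : Int), 0 ≤ count - c →
    (ys.foldl (pvStep count) (temp, c, false)).1 =
      temp ++ (ys.filter (fun n => PySem.Int.mod n 2 ≠ 0)).take (count - c).toNat := by
  induction ys with
  | nil => intro temp c _; simp
  | cons y ys ih =>
    intro temp c hc
    by_cases hcc : c = count
    · have h0 : (count - c).toNat = 0 := by omega
      simp [pvStep, hcc, pvStep_done]
    · by_cases hodd : PySem.Int.mod y 2 ≠ 0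
      · have hodd2 : y % 2 = 1 := by
          have h := hodd
          rw [PySem.Int.mod_eq_emod_of_pos (by norm_num)] at h
          omega
        have h1 : 0 ≤ count - (c + 1) := by omega
        have h2 : (count - c).toNat = (count - (c + 1)).toNat + 1 := by omega
        have hstep : pvStep count (temp, c, false) y = (temp ++ [y], c + 1, false) := by
          simp [pvStep, hcc, hodd2]
        rw [List.foldl_cons, hstep, ih (temp ++ [y]) (c + 1) h1]
        simp [hodd2, h2]
      · have hodd2 : ¬ (y % 2 = 1) := by
          have h := hodd
          rw [PySem.Int.mod_eq_emod_of_pos (by norm_num)] at h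
          omega
        have hstep : pvStep count (temp, c, false) y = (temp, c, false) := by
          simp [pvStep, hcc, hodd2]
        rw [List.foldl_cons, hstep, ih temp c hc]
        simp [hodd2]

theorem get_count_last_odd_spec : Claim_equal_get_count_last_odd := by
  intro numbers count _ hpre
  unfold Spec_get_count_last_odd get_count_last_odd get_count_last_odd_alt
  have hpre' : (0 : Int) ≤ count := hpre
  -- rewrite the countdown range as the reverse of the forward range
  have hr : PySem.List.pyRange ((numbers.length : Int) - 1) (-1) (-1)
      = (PySem.List.pyRange 0 (numbers.length : Int) 1).reverse := by
    have := PySem.List.pyRange_neg_one_eq_reverse ((numbers.length : Int) - 1) (-1)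
    simpa using this
  rw [hr]
  -- the fold only uses the index through pyGetD: fold over the mapped list
  have hmap : ((PySem.List.pyRange 0 (numbers.length : Int) 1).reverse.map
      (fun i => PySem.List.pyGetD numbers i 0)) = numbers.reverse := by
    rw [List.map_reverse]
    rw [PySem.List.map_pyGetD_pyRange_zero' numbers 0]
  have hfold :
      ((PySem.List.pyRange 0 (numbers.length : Int) 1).reverse.foldl
        (fun (st : List Int × Int × Bool) i =>
          let num := PySem.List.pyGetD numbers i 0
          if st.2.2 then st
          else if st.2.1 = count then (st.1, st.2.1, true)
          else if PySem.Int.mod num 2 ≠ 0 then (st.1 ++ [num], st.2.1 + 1, st.2.2)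
          else st) ([], 0, false))
      = numbers.reverse.foldl (pvStep count) ([], 0, false) := by
    rw [← hmap, List.foldl_map]
    rfl
  simp only [hfold]
  rw [pvStep_invariant count numbers.reverse [] 0 (by omega)]
  -- both sides as drop/take on the filtered list
  have hmax : 0 ≤ max (((numbers.filter (fun n => PySem.Int.mod n 2 ≠ 0)).length : Int) - count) 0 :=
    le_max_right _ _
  rw [PySem.List.slice_from _ hmax]
  rw [List.filter_reverse]
  rw [List.take_reverse]
  simp only [List.nil_append, List.reverse_reverse]
  congr 1
  omega
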